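-- pv_equiv track=rewrite | github.com/alexriderspy/COL703 | Ass1/solve.py | check
-- ===== SOURCE A (Python) =====
-- import copy
--
-- def remove_dup (lis):
--     return [*set(lis)]
--
-- def check(lis,lis1,lis2):
--     lis1 = lis1 + lis2
--     lis1 = remove_dup(lis1)
--     for i in range(len(lis1)):
--         for j in range(i+1,len(lis1)):
--             if lis1[i] == -lis1[j]:
--                 tmp = copy.deepcopy(lis1)
--                 tmp.remove(lis1[i])
--                 tmp.remove(lis1[j])
--                 tmp.sort()
--                 if tmp == lis:
--                     return True
--     return False
-- ===== SOURCE B (Python) =====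
-- def check(lis, lis1, lis2):
--     s = set(lis1 + lis2)
--     if len(s) != len(lis) + 2:
--         return False
--     extra = s - set(lis)
--     if len(extra) != 2:
--         return False
--     a, b = extra
--     if a != -b:
--         return False
--     return all(x < y for x, y in zip(lis, lis[1:]))
-- ===== Notes on version B (the rewrite author's own statement) =====
-- stated objective: faster
-- what changed: Instead of scanning all pairs of the deduplicated list and for each negated pair removing, deep-copying and sorting a candidate (O(n^3 log n)), B computes the set difference S \ set(lis) once, checks it is exactly two negated elements with |S| = len(lis)+2, and checks lis is strictly increasing (O(n) expected set operations plus one linear scan).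
import Mathlib
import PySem

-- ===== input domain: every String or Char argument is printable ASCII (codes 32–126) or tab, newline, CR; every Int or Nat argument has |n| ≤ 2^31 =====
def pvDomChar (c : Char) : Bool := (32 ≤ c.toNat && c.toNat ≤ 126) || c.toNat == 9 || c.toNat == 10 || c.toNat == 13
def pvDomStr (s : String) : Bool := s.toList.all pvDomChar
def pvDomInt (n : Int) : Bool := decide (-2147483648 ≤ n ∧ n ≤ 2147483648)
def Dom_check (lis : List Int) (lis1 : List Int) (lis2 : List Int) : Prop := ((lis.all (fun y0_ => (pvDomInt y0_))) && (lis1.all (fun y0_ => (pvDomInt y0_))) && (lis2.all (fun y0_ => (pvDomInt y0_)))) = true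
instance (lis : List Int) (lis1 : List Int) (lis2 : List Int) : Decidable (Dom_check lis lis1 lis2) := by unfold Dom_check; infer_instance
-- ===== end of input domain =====

-- B replaces A's all-pairs scan (with a removal + sort per candidate pair) by a single set-difference test; equal return values are proved below.

-- ===== PORT A =====
-- [*set(lis)]: the set is consumed only through order-insensitive operations below, so PySem.Set's first-occurrence order is exact for the result
def remove_dup (lis : List Int) : List Int := PySem.Set.ofList lis

-- the early-returning double index loop is the double `any` over the same index ranges;
-- `remove?` returning none (Python ValueError) is unreachable: the removed values are present in the (deduplicated) list
def check (lis : List Int) (lis1 : List Int) (lis2 : List Int) : Bool :=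
  let l := remove_dup (lis1 ++ lis2)
  let n : Int := l.length
  (PySem.List.pyRange 0 n 1).any (fun i =>
    (PySem.List.pyRange (i+1) n 1).any (fun j =>
      let a := PySem.List.pyGetD l i 0
      let b := PySem.List.pyGetD l j 0
      if a = -b then
        match PySem.List.remove? l a with
        | none => false
        | some t1 =>
          match PySem.List.remove? t1 b with
          | none => false
          | some tmp => decide (PySem.List.sorted tmp (fun x => x) false = lis)
      else false))

-- ===== PORT B =====
-- `a, b = extra` followed by the symmetric test `a != -b`: the order of the two unpacked set elements cannot affect the result
def check_alt (lis : List Int) (lis1 : List Int) (lis2 : List Int) : Bool :=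
  let s := PySem.Set.ofList (lis1 ++ lis2)
  if s.length ≠ lis.length + 2 then false
  else
    match PySem.Set.diff s (PySem.Set.ofList lis) with
    | [a, b] =>
      if a ≠ -b then false
      else (lis.zip (PySem.List.slice lis (some 1) none)).all (fun p => decide (p.1 < p.2))
    | _ => false

-- ===== PRECONDITION & SPEC =====
def Spec_check (lis : List Int) (lis1 : List Int) (lis2 : List Int) (out : Bool) : Prop := out = check_alt lis lis1 lis2
instance (lis : List Int) (lis1 : List Int) (lis2 : List Int) (out : Bool) : Decidable (Spec_check lis lis1 lis2 out) := by unfold Spec_check; infer_instance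

-- ===== CLAIM (what is proved, stated in full; the proofs are below) =====
def Claim_equal_check : Prop := ∀ (lis : List Int) (lis1 : List Int) (lis2 : List Int), Dom_check lis lis1 lis2 → Spec_check lis lis1 lis2 (check lis lis1 lis2)

-- ===== LEMMAS AND PROOFS =====

-- lis strictly increasing is exactly what B's zip-with-tail all-test checks
lemma zipall (xs : List Int) : ((xs.zip (xs.drop 1)).all fun p => decide (p.1 < p.2)) = true ↔ xs.Pairwise (· < ·) := by
  match xs with
  | [] => simp
  | [x] => simp
  | x :: y :: t =>
    have ih := zipall (y :: t)
    simp only [List.drop_one, List.tail_cons, List.zip_cons_cons, List.all_cons, Bool.and_eq_true, decide_eq_true_eq] at *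
    rw [ih]
    constructor
    · rintro ⟨hxy, hp⟩
      refine List.pairwise_cons.2 ⟨?_, hp⟩
      intro z hz
      rcases List.mem_cons.1 hz with rfl | hz
      · exact hxy
      · exact lt_trans hxy ((List.pairwise_cons.1 hp).1 z hz)
    · intro hp
      rcases List.pairwise_cons.1 hp with ⟨hx, hp'⟩
      exact ⟨hx y (by simp), hp'⟩

-- a duplicate-free list whose members are exactly two given distinct values is one of the two orderings
lemma nodup_pair_eq (xs : List Int) (a b : Int) (hnd : xs.Nodup) (hab : a ≠ b)
    (h : ∀ x, x ∈ xs ↔ x = a ∨ x = b) : xs = [a, b] ∨ xs = [b, a] := by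
  have hperm : xs.Perm [a, b] := (List.perm_ext_iff_of_nodup hnd (by simp [hab])).2 (by simp [h])
  have hlen := hperm.length_eq
  match xs, hlen with
  | [x, y], _ =>
    have hx := (h x).1 (by simp)
    have hy := (h y).1 (by simp)
    have hxy : x ≠ y := by simp at hnd; exact hnd
    have hax : a ∈ [x, y] := (h a).2 (Or.inl rfl)
    simp at hax
    rcases hx with rfl | rfl <;> rcases hy with rfl | rfl <;> simp_all

-- A returns True iff some pair of distinct negated elements of the deduplicated pool sorts, after removal, to lis
lemma check_iff (lis lis1 lis2 : List Int) :
    check lis lis1 lis2 = true ↔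
      ∃ a b : Int, a ∈ PySem.Set.ofList (lis1 ++ lis2) ∧ b ∈ PySem.Set.ofList (lis1 ++ lis2) ∧ a ≠ b ∧ a = -b ∧
        PySem.List.sorted (((PySem.Set.ofList (lis1 ++ lis2)).erase a).erase b) (fun x => x) false = lis := by
  have hnd : (PySem.Set.ofList (lis1 ++ lis2)).Nodup := PySem.Set.nodup_ofList _
  unfold check remove_dup
  dsimp only
  set l := PySem.Set.ofList (lis1 ++ lis2) with hl
  rw [List.any_eq_true]
  constructor
  · rintro ⟨i, hi, hbody⟩
    rw [PySem.List.mem_pyRange_one] at hi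
    obtain ⟨i', rfl⟩ := Int.eq_ofNat_of_zero_le hi.1
    rw [List.any_eq_true] at hbody
    obtain ⟨j, hj, hbody⟩ := hbody
    rw [PySem.List.mem_pyRange_one] at hj
    obtain ⟨j', rfl⟩ := Int.eq_ofNat_of_zero_le (le_trans (by positivity) hj.1)
    have hilt : i' < l.length := by exact_mod_cast hi.2
    have hjlt : j' < l.length := by exact_mod_cast hj.2
    have hij : i' < j' := by
      have h1 := hj.1
      have h2 : (i' : Int) < (j' : Int) := by omega
      exact_mod_cast h2
    rw [PySem.List.pyGetD_natCast, PySem.List.pyGetD_natCast, List.getD_eq_getElem _ _ hilt, List.getD_eq_getElem _ _ hjlt] at hbody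
    set a := l[i'] with ha
    set b := l[j'] with hb
    have hane : a ≠ b := fun h => absurd ((List.Nodup.getElem_inj_iff hnd).1 h) (by omega)
    split_ifs at hbody with hneg
    · rw [PySem.List.remove?_eq_some_erase l a (ha ▸ List.getElem_mem hilt)] at hbody
      dsimp only at hbody
      have hbmem : b ∈ l.erase a := (List.Nodup.mem_erase_iff hnd).2 ⟨fun h => hane h.symm, List.getElem_mem hjlt⟩
      rw [PySem.List.remove?_eq_some_erase _ b hbmem] at hbody
      dsimp only at hbody
      exact ⟨a, b, List.getElem_mem hilt, List.getElem_mem hjlt, hane, hneg, of_decide_eq_true hbody⟩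
  · rintro ⟨a, b, ha, hb, hab, hneg, hsort⟩
    have hia := List.idxOf_lt_length_of_mem ha
    have hib := List.idxOf_lt_length_of_mem hb
    have hga : l[l.idxOf a] = a := List.getElem_idxOf hia
    have hgb : l[l.idxOf b] = b := List.getElem_idxOf hib
    have hijne : l.idxOf a ≠ l.idxOf b := by
      intro h
      apply hab
      rw [← hga, ← hgb]
      simp_rw [h]
    have main : ∀ (i j : Nat) (hi : i < l.length) (hj : j < l.length), i < j →
        l[i] = -l[j] → PySem.List.sorted ((l.erase l[i]).erase l[j]) (fun x => x) false = lis →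
        ∃ x ∈ PySem.List.pyRange 0 (l.length : Int) 1,
          (PySem.List.pyRange (x+1) (l.length : Int) 1).any (fun j' =>
            if PySem.List.pyGetD l x 0 = -PySem.List.pyGetD l j' 0 then
              match PySem.List.remove? l (PySem.List.pyGetD l x 0) with
              | none => false
              | some t1 =>
                match PySem.List.remove? t1 (PySem.List.pyGetD l j' 0) with
                | none => false
                | some tmp => decide (PySem.List.sorted tmp (fun x => x) false = lis)
            else false) = true := by
      intro i j hi hj hij hneg' hsort'
      refine ⟨(i : Int), ?_, ?_⟩
      · rw [PySem.List.mem_pyRange_one]; constructor <;> [positivity; exact_mod_cast hi]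
      · rw [List.any_eq_true]
        refine ⟨(j : Int), ?_, ?_⟩
        · rw [PySem.List.mem_pyRange_one]; constructor <;> [exact_mod_cast Nat.succ_le_of_lt hij; exact_mod_cast hj]
        · dsimp only
          rw [PySem.List.pyGetD_natCast, PySem.List.pyGetD_natCast, List.getD_eq_getElem _ _ hi, List.getD_eq_getElem _ _ hj]
          rw [if_pos hneg']
          have hane : l[i] ≠ l[j] := fun h => absurd ((List.Nodup.getElem_inj_iff hnd).1 h) (by omega)
          rw [PySem.List.remove?_eq_some_erase l _ (List.getElem_mem hi)]
          dsimp only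
          have hbmem : l[j] ∈ l.erase l[i] := (List.Nodup.mem_erase_iff hnd).2 ⟨fun h => hane h.symm, List.getElem_mem hj⟩
          rw [PySem.List.remove?_eq_some_erase _ _ hbmem]
          dsimp only
          exact decide_eq_true hsort'
    rcases Nat.lt_or_ge (l.idxOf a) (l.idxOf b) with hlt | hge
    · exact main _ _ hia hib hlt (by rw [hga, hgb]; exact hneg) (by rw [hga, hgb]; exact hsort)
    · have hlt : l.idxOf b < l.idxOf a := lt_of_le_of_ne hge (Ne.symm hijne)
      exact main _ _ hib hia hlt (by rw [hga, hgb]; omega) (by rw [hga, hgb, List.erase_comm]; exact hsort)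

-- B returns True iff the pool has exactly two more elements than lis, their set difference is two negated elements, and lis is strictly increasing
lemma check_alt_iff (lis lis1 lis2 : List Int) :
    check_alt lis lis1 lis2 = true ↔
      (PySem.Set.ofList (lis1 ++ lis2)).length = lis.length + 2 ∧
      (∃ a b : Int, PySem.Set.diff (PySem.Set.ofList (lis1 ++ lis2)) (PySem.Set.ofList lis) = [a, b] ∧ a = -b) ∧
      lis.Pairwise (· < ·) := by
  unfold check_alt
  have hs : PySem.List.slice lis (some 1) none = lis.drop 1 := by
    have := PySem.List.slice_from lis (a := 1) (by norm_num)
    simpa using this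
  rw [hs]
  dsimp only
  split_ifs with hlen
  · simp only [false_iff]; rintro ⟨h1, -⟩; exact hlen h1
  · rcases hdiff : PySem.Set.diff (PySem.Set.ofList (lis1 ++ lis2)) (PySem.Set.ofList lis) with _ | ⟨a, _ | ⟨b, _ | ⟨c, r⟩⟩⟩
    · simp
    · simp
    · dsimp only
      split_ifs with hneg
      · simp only [false_iff]; rintro ⟨-, ⟨a', b', heq, hn⟩, -⟩
        injection heq with h1 h2; injection h2 with h2 _; subst h1; subst h2
        exact hneg hn
      · rw [zipall]
        rw [not_ne_iff] at hlen hneg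
        constructor
        · intro hp; exact ⟨hlen, ⟨a, b, rfl, hneg⟩, hp⟩
        · rintro ⟨-, -, hp⟩; exact hp
    · simp

-- the two characterisations agree
lemma main_iff (lis lis1 lis2 : List Int) :
    (∃ a b : Int, a ∈ PySem.Set.ofList (lis1 ++ lis2) ∧ b ∈ PySem.Set.ofList (lis1 ++ lis2) ∧ a ≠ b ∧ a = -b ∧
        PySem.List.sorted (((PySem.Set.ofList (lis1 ++ lis2)).erase a).erase b) (fun x => x) false = lis) ↔
      ((PySem.Set.ofList (lis1 ++ lis2)).length = lis.length + 2 ∧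
       (∃ a b : Int, PySem.Set.diff (PySem.Set.ofList (lis1 ++ lis2)) (PySem.Set.ofList lis) = [a, b] ∧ a = -b) ∧
       lis.Pairwise (· < ·)) := by
  set S := PySem.Set.ofList (lis1 ++ lis2) with hS
  have hnd : S.Nodup := hS ▸ PySem.Set.nodup_ofList _
  clear_value S
  constructor
  · rintro ⟨a, b, ha, hb, hab, hneg, hsort⟩
    have hbe : b ∈ S.erase a := (List.Nodup.mem_erase_iff hnd).2 ⟨fun h => hab h.symm, hb⟩
    have hnd1 : (S.erase a).Nodup := hnd.erase a
    have hndt : ((S.erase a).erase b).Nodup := hnd1.erase b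
    have hlen1 : (S.erase a).length = S.length - 1 := List.length_erase_of_mem ha
    have hlen2 : ((S.erase a).erase b).length = (S.erase a).length - 1 := List.length_erase_of_mem hbe
    have hpos1 : 0 < S.length := List.length_pos_of_mem ha
    have hpos2 : 0 < (S.erase a).length := List.length_pos_of_mem hbe
    have hlis : lis.length = ((S.erase a).erase b).length := by
      rw [← hsort, PySem.List.length_sorted]
    have hperm : lis.Perm ((S.erase a).erase b) := hsort ▸ PySem.List.sorted_perm _ _ _
    have hlnd : lis.Nodup := hperm.symm.nodup hndt
    have hple : lis.Pairwise (fun x y : Int => x ≤ y) := by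
      have := PySem.List.sorted_pairwise ((S.erase a).erase b) (fun x : Int => x)
      rw [hsort] at this
      exact this
    have hplt : lis.Pairwise (· < ·) :=
      (hple.and hlnd).imp (fun h => lt_of_le_of_ne h.1 h.2)
    have hmem_lis : ∀ x : Int, x ∈ lis ↔ x ∈ S ∧ x ≠ a ∧ x ≠ b := by
      intro x
      rw [hperm.mem_iff, List.Nodup.mem_erase_iff hnd1, List.Nodup.mem_erase_iff hnd]
      tauto
    have hdmem : ∀ x : Int, x ∈ PySem.Set.diff S (PySem.Set.ofList lis) ↔ x = a ∨ x = b := by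
      intro x
      have hd := PySem.Set.mem_diff S (PySem.Set.ofList lis) x
      rw [PySem.Set.mem_ofList, hmem_lis x] at hd
      rw [hd]
      constructor
      · rintro ⟨hxs, hn⟩
        by_contra hc
        rw [not_or] at hc
        exact hn ⟨hxs, hc.1, hc.2⟩
      · rintro (rfl | rfl)
        · exact ⟨ha, fun h => h.2.1 rfl⟩
        · exact ⟨hb, fun h => h.2.2 rfl⟩
    have hdnd : (PySem.Set.diff S (PySem.Set.ofList lis)).Nodup := PySem.Set.nodup_diff _ _ hnd
    refine ⟨by omega, ?_, hplt⟩
    rcases nodup_pair_eq _ a b hdnd hab hdmem with h | h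
    · exact ⟨a, b, h, hneg⟩
    · exact ⟨b, a, h, by omega⟩
  · rintro ⟨hlen, ⟨a, b, hdiff, hneg⟩, hpw⟩
    have hdnd : (PySem.Set.diff S (PySem.Set.ofList lis)).Nodup := PySem.Set.nodup_diff _ _ hnd
    rw [hdiff] at hdnd
    have hab : a ≠ b := by simpa using (List.pairwise_cons.1 hdnd).1 b (by simp)
    have hamem : a ∈ PySem.Set.diff S (PySem.Set.ofList lis) := by rw [hdiff]; simp
    have hbmem : b ∈ PySem.Set.diff S (PySem.Set.ofList lis) := by rw [hdiff]; simp
    have ha := (PySem.Set.mem_diff _ _ _).1 hamem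
    have hb := (PySem.Set.mem_diff _ _ _).1 hbmem
    rw [PySem.Set.mem_ofList] at ha hb
    have hlnd : lis.Nodup := hpw.imp ne_of_lt
    have hf2 : (S.filter (fun x => !decide (x ∈ lis))).Perm (PySem.Set.diff S (PySem.Set.ofList lis)) := by
      rw [List.perm_ext_iff_of_nodup (hnd.filter _) (PySem.Set.nodup_diff _ _ hnd)]
      intro x
      rw [List.mem_filter, PySem.Set.mem_diff, PySem.Set.mem_ofList]
      simp
    have hf2len : (S.filter (fun x => !decide (x ∈ lis))).length = 2 := by
      rw [hf2.length_eq, hdiff]; rfl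
    have hsplit : S.length = (S.filter (fun x => decide (x ∈ lis))).length + (S.filter (fun x => !decide (x ∈ lis))).length :=
      List.length_eq_length_filter_add _
    have hf1len : (S.filter (fun x => decide (x ∈ lis))).length = lis.length := by omega
    have hf1sub : (S.filter (fun x => decide (x ∈ lis))) ⊆ lis := by
      intro x hx
      have := (List.mem_filter.1 hx).2
      simpa using this
    have hf1perm : (S.filter (fun x => decide (x ∈ lis))).Perm lis :=
      List.Subperm.perm_of_length_le (List.subperm_of_subset (hnd.filter _) hf1sub) (by omega)
    have hmemS : ∀ x : Int, x ∈ lis → x ∈ S := by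
      intro x hx
      have : x ∈ S.filter (fun x => decide (x ∈ lis)) := hf1perm.mem_iff.2 hx
      exact (List.mem_filter.1 this).1
    refine ⟨a, b, ha.1, hb.1, hab, hneg, ?_⟩
    apply PySem.List.sorted_eq_of_perm_of_pairwise_lt
    · rw [List.perm_ext_iff_of_nodup hlnd ((hnd.erase a).erase b)]
      intro x
      rw [List.Nodup.mem_erase_iff (hnd.erase a), List.Nodup.mem_erase_iff hnd]
      constructor
      · intro hx
        refine ⟨?_, ?_, hmemS x hx⟩
        · rintro rfl; exact hb.2 hx
        · rintro rfl; exact ha.2 hx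
      · rintro ⟨hxb, hxa, hxS⟩
        by_contra hxl
        have : x ∈ PySem.Set.diff S (PySem.Set.ofList lis) := by
          rw [PySem.Set.mem_diff, PySem.Set.mem_ofList]
          exact ⟨hxS, hxl⟩
        rw [hdiff] at this
        simp at this
        tauto
    · exact hpw

-- ===== VERDICT (by name: the statement is the Claim_ definition above) =====
theorem check_spec : Claim_equal_check := by
  intro lis lis1 lis2 _
  unfold Spec_check
  exact Bool.eq_iff_iff.mpr
    (((check_iff lis lis1 lis2).trans (main_iff lis lis1 lis2)).trans (check_alt_iff lis lis1 lis2).symm)
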